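-- pv_equiv track=rewrite | github.com/komjum6/Periode-7-Opdracht | Python ORF Finder/dataprocessing.py | findNextStopCodon
-- ===== SOURCE A (Python) =====
-- StopCodons = ['TAG', 'TGA', 'TAA']
--
-- def findNextCodon(seq, start, codon):
--     # loop over een lijst met indeces
--     # Er worden hier stappen van 3 genomen
--     seq = seq.upper()
--     for i in range(start, len(seq), 3):
--         # kijk of de huidige startpositie diegene is die we zoeken
--         if seq[i:i+3] == codon:
--             # Retourneer de startpositie van het codon
--             return i
--     return None
--
-- def findNextStopCodon(seq, start):
--     # uppercase de sequentie:
--     seq = seq.upper()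
--     # Maak een lijst voor codons
--     results = []
--     # loop over de stopcodons
--     for stopCodon in StopCodons:
--         # Vindt de startpositie van het volgende codon
--         pos = findNextCodon(seq, start, stopCodon)
--         # Check of pos niet gelijk is aan None, want dan zou de codon niet zijn gevonden
--         if pos != None:
--         # append de start positie bij de lijst
--             results.append(pos)
--     if len(results) > 0:
--         # Als de positie van een of meer stop codons wordt gevonden retourneren we de kleinste (dichtsbijzijnde)
--         return min(results)
--     else:
--         # return None als er geen stop condons zijn
--         return None
-- ===== SOURCE B (Python) =====
-- StopCodons = ['TAG', 'TGA', 'TAA']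
--
-- def findNextStopCodon(seq, start):
--     # one in-frame scan: first position whose codon is any stop codon
--     seq = seq.upper()
--     for i in range(start, len(seq), 3):
--         if seq[i:i+3] in StopCodons:
--             return i
--     return None
-- ===== Notes on version B (the rewrite author's own statement) =====
-- stated objective: simpler
-- what changed: A runs three separate full in-frame scans (one per stop codon via findNextCodon) and then takes min() of the collected positions; B does a single in-frame scan returning the first position whose codon is in the stop-codon list.
import Mathlib
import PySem

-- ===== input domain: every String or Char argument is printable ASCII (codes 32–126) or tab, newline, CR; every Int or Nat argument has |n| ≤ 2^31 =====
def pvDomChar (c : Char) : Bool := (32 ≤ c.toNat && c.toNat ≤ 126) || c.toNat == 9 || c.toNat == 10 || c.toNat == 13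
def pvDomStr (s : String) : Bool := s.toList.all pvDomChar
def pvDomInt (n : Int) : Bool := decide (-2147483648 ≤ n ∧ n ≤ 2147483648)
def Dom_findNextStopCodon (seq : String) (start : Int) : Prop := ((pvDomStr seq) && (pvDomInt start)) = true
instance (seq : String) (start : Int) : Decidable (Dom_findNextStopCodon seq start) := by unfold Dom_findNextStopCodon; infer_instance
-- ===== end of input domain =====

-- B replaces A's three separate full in-frame scans (one per stop codon) plus min() with ONE
-- in-frame scan that returns the first position whose codon is any of the three stop codons.

-- ===== PORT A =====
def StopCodons : List String := ["TAG", "TGA", "TAA"]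

-- 'for i in range(start, len(seq), 3): if seq[i:i+3] == codon: return i / return None' of findNextCodon
def findCodonLoop (cs : List Char) (codon : List Char) : List Int → Option Int
  | [] => none
  | i :: rest =>
    if PySem.List.slice cs (some i) (some (i + 3)) == codon then some i
    else findCodonLoop cs codon rest

def findNextCodon (seq : String) (start : Int) (codon : String) : Option Int :=
  let cs := PySem.Chars.upper seq.toList          -- seq = seq.upper()
  findCodonLoop cs codon.toList (PySem.List.pyRange start (cs.length : Int) 3)

def findNextStopCodon (seq : String) (start : Int) : Option Int :=
  let s := PySem.Str.upper seq                    -- seq = seq.upper()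
  let results := StopCodons.foldl (fun acc c =>
      match findNextCodon s start c with          -- pos = findNextCodon(seq, start, stopCodon)
      | some p => acc ++ [p]                      -- if pos != None: results.append(pos)
      | none => acc) []
  if results.length > 0 then PySem.List.min? results (fun x => x) else none

-- ===== PORT B =====
-- (B shares the module-level StopCodons constant, as in the Python module)
-- 'for i in range(start, len(seq), 3): if seq[i:i+3] in StopCodons: return i / return None' of B
def altLoop (cs : List Char) : List Int → Option Int
  | [] => none
  | i :: rest =>
    if (StopCodons.map String.toList).contains (PySem.List.slice cs (some i) (some (i + 3))) then some i
    else altLoop cs rest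

def findNextStopCodon_alt (seq : String) (start : Int) : Option Int :=
  let cs := PySem.Chars.upper seq.toList          -- seq = seq.upper()
  altLoop cs (PySem.List.pyRange start (cs.length : Int) 3)

-- ===== PRECONDITION & SPEC =====
def Spec_findNextStopCodon (seq : String) (start : Int) (out : Option Int) : Prop := out = findNextStopCodon_alt seq start
instance (seq : String) (start : Int) (out : Option Int) : Decidable (Spec_findNextStopCodon seq start out) := by unfold Spec_findNextStopCodon; infer_instance

-- ===== CLAIM (what is proved, stated in full; the proofs are below) =====
def Claim_equal_findNextStopCodon : Prop := ∀ (seq : String) (start : Int), Dom_findNextStopCodon seq start → Spec_findNextStopCodon seq start (findNextStopCodon seq start)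

-- ===== LEMMAS AND PROOFS =====

theorem upperChar_idem (c : Char) :
    PySem.Chars.upperChar (PySem.Chars.upperChar c) = PySem.Chars.upperChar c := by
  unfold PySem.Chars.upperChar
  by_cases h : PySem.Chars.islower c = true
  · rw [if_pos h]
    have hb : 97 ≤ c.toNat ∧ c.toNat ≤ 122 := by
      simp only [PySem.Chars.islower, Bool.and_eq_true, decide_eq_true_eq, Char.le_def] at h
      exact ⟨h.1, h.2⟩
    have ht : (Char.ofNat (c.toNat - 32)).toNat = c.toNat - 32 := by
      rw [Char.toNat_ofNat, if_pos]; left; omega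
    have hx : ¬ ('a' ≤ Char.ofNat (c.toNat - 32)) := by
      rw [Char.le_def]
      show ¬ (97 ≤ (Char.ofNat (c.toNat - 32)).toNat)
      rw [ht]
      omega
    rw [if_neg]
    simp [PySem.Chars.islower, hx]
  · rw [if_neg h, if_neg h]

theorem upper_idem (l : List Char) :
    PySem.Chars.upper (PySem.Chars.upper l) = PySem.Chars.upper l := by
  simp [PySem.Chars.upper, Function.comp_def, upperChar_idem]

theorem findCodonLoop_mem {cs c : List Char} {R : List Int} {j : Int}
    (h : findCodonLoop cs c R = some j) : j ∈ R := by
  induction R with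
  | nil => simp [findCodonLoop] at h
  | cons i rest ih =>
    unfold findCodonLoop at h
    split at h
    · simp only [Option.some.injEq] at h
      simp [h]
    · exact List.mem_cons_of_mem _ (ih h)

theorem min?_id_eq {l : List Int} {i : Int} (hi : i ∈ l) (h : ∀ x ∈ l, i ≤ x) :
    PySem.List.min? l (fun x => x) = some i := by
  cases hmin : PySem.List.min? l (fun x => x) with
  | none =>
    rw [PySem.List.min?_eq_none_iff] at hmin
    subst hmin
    simp at hi
  | some m =>
    have h1 : i ≤ m := h m (PySem.List.min?_mem hmin)
    have h2 : m ≤ i := PySem.List.min?_isMin hmin i hi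
    rw [le_antisymm h2 h1]

-- the shape in which A combines the three per-codon scan results
def combineA (o1 o2 o3 : Option Int) : Option Int :=
  let l := o1.toList ++ o2.toList ++ o3.toList
  if l.length > 0 then PySem.List.min? l (fun x => x) else none

theorem combineA_eq_some (i : Int) (o1 o2 o3 : Option Int)
    (hsome : o1 = some i ∨ o2 = some i ∨ o3 = some i)
    (hle : ∀ j, o1 = some j ∨ o2 = some j ∨ o3 = some j → i ≤ j) :
    combineA o1 o2 o3 = some i := by
  unfold combineA
  have hi : i ∈ o1.toList ++ o2.toList ++ o3.toList := by
    rcases hsome with h | h | h <;> simp [h]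
  rw [if_pos (by simpa using List.length_pos_of_mem hi)]
  refine min?_id_eq hi ?_
  intro x hx
  apply hle
  simp only [List.mem_append, Option.mem_toList] at hx
  tauto

theorem contains3_eq (x a b c : List Char) : ([a, b, c].contains x) = (x == a || x == b || x == c) := by
  simp [Bool.or_assoc, beq_eq_decide]

theorem loop_eq (cs t1 t2 t3 : List Char)
    (hc : StopCodons.map String.toList = [t1, t2, t3]) (R : List Int)
    (hR : R.Pairwise (· < ·)) :
    combineA (findCodonLoop cs t1 R) (findCodonLoop cs t2 R) (findCodonLoop cs t3 R) = altLoop cs R := by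
  induction R with
  | nil => rfl
  | cons i rest ih =>
    have hlt : ∀ x ∈ rest, i < x := (List.pairwise_cons.mp hR).1
    have htail := ih (List.pairwise_cons.mp hR).2
    have hstep : ∀ t : List Char, findCodonLoop cs t (i :: rest) =
        if PySem.List.slice cs (some i) (some (i + 3)) == t then some i
        else findCodonLoop cs t rest := fun t => rfl
    have haltstep : altLoop cs (i :: rest) =
        if ([t1, t2, t3].contains (PySem.List.slice cs (some i) (some (i + 3)))) = true then some i
        else altLoop cs rest := by
      rw [show altLoop cs (i :: rest) =
          if ((StopCodons.map String.toList).contains (PySem.List.slice cs (some i) (some (i + 3)))) = true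
          then some i else altLoop cs rest from rfl, hc]
    have hle : ∀ (t : List Char) (j : Int), findCodonLoop cs t (i :: rest) = some j → i ≤ j := by
      intro t j hj
      rw [hstep t] at hj
      split at hj
      · simp only [Option.some.injEq] at hj
        omega
      · exact le_of_lt (hlt j (findCodonLoop_mem hj))
    by_cases hin : ([t1, t2, t3].contains (PySem.List.slice cs (some i) (some (i + 3)))) = true
    · -- some stop codon matches at i: both sides return `some i`
      have hor : PySem.List.slice cs (some i) (some (i + 3)) = t1 ∨
                 PySem.List.slice cs (some i) (some (i + 3)) = t2 ∨
                 PySem.List.slice cs (some i) (some (i + 3)) = t3 := by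
        have h3 := contains3_eq (PySem.List.slice cs (some i) (some (i + 3))) t1 t2 t3
        rw [h3] at hin
        simpa [or_assoc] using hin
      rw [haltstep, if_pos hin]
      apply combineA_eq_some i _ _ _ ?_ ?_
      · rcases hor with h | h | h
        · left; rw [hstep t1, if_pos (by simp [h])]
        · right; left; rw [hstep t2, if_pos (by simp [h])]
        · right; right; rw [hstep t3, if_pos (by simp [h])]
      · intro j hj
        rcases hj with hj | hj | hj <;> exact hle _ j hj
    · -- no stop codon at i: each scan steps to the tail and the IH applies
      have hor : ¬ (PySem.List.slice cs (some i) (some (i + 3)) = t1 ∨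
                    PySem.List.slice cs (some i) (some (i + 3)) = t2 ∨
                    PySem.List.slice cs (some i) (some (i + 3)) = t3) := by
        intro hcon
        apply hin
        rw [contains3_eq]
        simpa [or_assoc] using hcon
      push Not at hor
      rw [haltstep, if_neg hin, hstep t1, if_neg (by simp [hor.1]),
          hstep t2, if_neg (by simp [hor.2.1]), hstep t3, if_neg (by simp [hor.2.2])]
      exact htail

theorem pairwise_pyRange3 (a b : Int) : (PySem.List.pyRange a b 3).Pairwise (· < ·) := by
  rw [PySem.List.pyRange_of_pos a b (by norm_num)]
  exact List.Pairwise.map _ (fun k1 k2 h => by omega) (List.pairwise_lt_range)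

theorem match_append (acc : List Int) (o : Option Int) :
    (match o with | some p => acc ++ [p] | none => acc) = acc ++ o.toList := by
  cases o <;> simp

-- ===== VERDICT (by name: the statement is the Claim_ definition above) =====
theorem findNextStopCodon_spec : Claim_equal_findNextStopCodon := by
  intro seq start _
  unfold Spec_findNextStopCodon findNextStopCodon findNextStopCodon_alt findNextCodon
  simp only [StopCodons, List.foldl, match_append, PySem.Str.toList_upper, upper_idem,
    List.nil_append]
  exact loop_eq (PySem.Chars.upper seq.toList) _ _ _ rfl _ (pairwise_pyRange3 _ _)
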